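-- pv_equiv track=rewrite | github.com/saleamlakw/A2SV | 0338-counting-bits/0338-counting-bits.py | countBits
-- ===== SOURCE A (Python) =====
-- from typing import List
--
-- def countBits(n: int) -> List[int]:
--     re=[]
--     for i in range(n+1):
--         count=0
--         while i:
--             count+=(i&1)
--             i>>=1
--         re.append(count)
--     return re
-- ===== SOURCE B (Python) =====
-- def countBits(n: int):
--     re = [0] * (n + 1)
--     for i in range(1, n + 1):
--         re[i] = re[i >> 1] + (i & 1)
--     return re
-- ===== Notes on version B (the rewrite author's own statement) =====
-- stated objective: faster
-- what changed: Replaces the per-number bit-stripping while loop with a DP that reuses the already-computed count re[i>>1] plus the low bit, one O(1) step per number.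
import Mathlib
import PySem

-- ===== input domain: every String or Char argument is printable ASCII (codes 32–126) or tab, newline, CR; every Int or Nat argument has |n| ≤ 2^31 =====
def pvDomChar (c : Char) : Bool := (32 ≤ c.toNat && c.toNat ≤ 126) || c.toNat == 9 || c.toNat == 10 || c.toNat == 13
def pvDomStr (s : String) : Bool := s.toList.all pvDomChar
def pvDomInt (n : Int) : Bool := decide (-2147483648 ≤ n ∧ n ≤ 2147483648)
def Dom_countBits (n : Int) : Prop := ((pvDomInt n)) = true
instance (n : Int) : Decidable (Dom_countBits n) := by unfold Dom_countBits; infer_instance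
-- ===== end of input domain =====

-- B replaces A's per-number while loop (strip bits one by one) with the O(n) DP re[i] = re[i>>1] + (i&1).

-- ===== PORT A =====
-- inner 'while i: count += i&1; i >>= 1' — i comes from range(n+1), so i ≥ 0 and
-- Nat division/mod are exact for Python's '>>' and '&1' here
def popLoop (i : Nat) (count : Int) : Int :=
  if i = 0 then count else popLoop (i / 2) (count + (i % 2 : Nat))
decreasing_by exact Nat.div_lt_self (Nat.pos_of_ne_zero (by assumption)) (by omega)

def countBits (n : Int) : List Int :=
  (PySem.List.pyRange 0 (n + 1) 1).foldl (fun re i => re ++ [popLoop i.toNat 0]) []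

-- ===== PORT B =====
-- '[0]*(n+1)' is [] for n+1 ≤ 0, exactly List.replicate (n+1).toNat 0;
-- i ≥ 1 in the loop, so Int '/' and '%' coincide with Python's 'i >> 1' and 'i & 1'
def countBits_alt (n : Int) : List Int :=
  (PySem.List.pyRange 1 (n + 1) 1).foldl
    (fun re i => re.set i.toNat (PySem.List.pyGetD re (i / 2) 0 + i % 2))
    (List.replicate (n + 1).toNat 0)

-- ===== PRECONDITION & SPEC =====
def Spec_countBits (n : Int) (out : List Int) : Prop := out = countBits_alt n
instance (n : Int) (out : List Int) : Decidable (Spec_countBits n out) := by unfold Spec_countBits; infer_instance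

-- ===== CLAIM (what is proved, stated in full; the proofs are below) =====
def Claim_equal_countBits : Prop := ∀ (n : Int), Dom_countBits n → Spec_countBits n (countBits n)

-- ===== LEMMAS AND PROOFS =====

theorem popLoop_acc (k : Nat) (c : Int) : popLoop k c = c + popLoop k 0 := by
  induction k using Nat.strong_induction_on generalizing c with
  | _ k ih =>
    by_cases h : k = 0
    · simp [h, popLoop]
    · have hlt := Nat.div_lt_self (Nat.pos_of_ne_zero h) (by omega : 1 < 2)
      have e1 : popLoop k c = popLoop (k / 2) (c + (k % 2 : Nat)) := by
        conv_lhs => rw [popLoop]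
        rw [if_neg h]
      have e2 : popLoop k 0 = popLoop (k / 2) (0 + (k % 2 : Nat)) := by
        conv_lhs => rw [popLoop]
        rw [if_neg h]
      rw [e1, e2, ih (k / 2) hlt (c + (k % 2 : Nat)), ih (k / 2) hlt (0 + (k % 2 : Nat))]
      ring

theorem popLoop_step (k : Nat) (h : k ≠ 0) :
    popLoop k 0 = popLoop (k / 2) 0 + (k % 2 : Nat) := by
  rw [popLoop, if_neg h, popLoop_acc]
  ring

-- the state of B's loop after processing 1..j (prefix filled in, rest still 0)
def buildB (m j : Nat) : List Int :=
  (List.range m).map (fun k => if k ≤ j then popLoop k 0 else 0)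

theorem buildB_zero (m : Nat) : buildB m 0 = List.replicate m 0 := by
  apply List.ext_getElem
  · simp [buildB]
  · intro k hk1 hk2
    simp [buildB]
    intro hk0
    subst hk0
    rw [popLoop]
    simp

theorem buildB_step (m j : Nat) (hj : j + 1 < m) :
    (buildB m j).set (j + 1)
      (PySem.List.pyGetD (buildB m j) ((((j : Int) + 1)) / 2) 0 + ((j : Int) + 1) % 2)
      = buildB m (j + 1) := by
  have hdiv : (((j : Int) + 1)) / 2 = (((j + 1) / 2 : Nat) : Int) := by omega
  have hmod : ((j : Int) + 1) % 2 = (((j + 1) % 2 : Nat) : Int) := by omega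
  have hlt : (j + 1) / 2 < m := by omega
  have hget : PySem.List.pyGetD (buildB m j) ((((j : Int) + 1)) / 2) 0
      = popLoop ((j + 1) / 2) 0 := by
    rw [hdiv, PySem.List.pyGetD_natCast]
    have hlen : (j + 1) / 2 < (buildB m j).length := by simp [buildB]; omega
    rw [List.getD_eq_getElem _ _ hlen]
    simp [buildB]
    intro h
    exact absurd h (by omega)
  rw [hget, hmod]
  apply List.ext_getElem
  · simp [buildB]
  · intro k hk1 hk2
    simp only [buildB] at hk1 ⊢
    by_cases hkj : k = j + 1
    · subst hkj
      rw [List.getElem_set_self (by simp [buildB]; omega)]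
      simp
      rw [popLoop_step (j + 1) (by omega), hmod]
    · rw [List.getElem_set_ne (by omega)]
      simp
      by_cases hle : k ≤ j
      · rw [if_pos hle, if_pos (by omega)]
      · rw [if_neg hle, if_neg (by omega)]

theorem loopB_invariant (m : Nat) (j : Nat) (hj : j < m) :
    (PySem.List.pyRange 1 ((j : Int) + 1) 1).foldl
      (fun re i => re.set i.toNat (PySem.List.pyGetD re (i / 2) 0 + i % 2))
      (List.replicate m 0) = buildB m j := by
  induction j with
  | zero => rw [PySem.List.pyRange_one_eq_nil (by omega)]; simp [buildB_zero]
  | succ j ih =>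
    push_cast
    rw [PySem.List.pyRange_one_succ_right (by omega), List.foldl_append,
      ih (by omega)]
    simp only [List.foldl_cons, List.foldl_nil]
    have htoNat : ((j : Int) + 1).toNat = j + 1 := by omega
    rw [htoNat]
    exact buildB_step m j hj

theorem countBits_eq_map (n : Int) :
    countBits n = (List.range (n + 1).toNat).map (fun k => popLoop k 0) := by
  unfold countBits
  rw [PySem.List.foldl_append_singleton_eq_map, PySem.List.pyRange_one]
  simp [Function.comp]

-- ===== VERDICT (by name: the statement is the Claim_ definition above) =====
theorem countBits_spec : Claim_equal_countBits := by
  intro n _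
  unfold Spec_countBits countBits_alt
  rw [countBits_eq_map]
  by_cases h : n ≤ -1
  · rw [PySem.List.pyRange_one_eq_nil (by omega)]
    have : (n + 1).toNat = 0 := by omega
    simp [this]
  · -- n ≥ 0; write m = (n+1).toNat, the loop runs j = m - 1 full steps
    have hn : 0 ≤ n := by omega
    set m : Nat := (n + 1).toNat with hm
    have hm1 : 1 ≤ m := by omega
    have hcast : n + 1 = ((m : Int)) := by omega
    have h2 : (n + 1) = (((m - 1 : Nat) : Int)) + 1 := by
      push_cast [Nat.cast_sub hm1]; omega
    rw [h2, loopB_invariant m (m - 1) (by omega)]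
    unfold buildB
    apply List.map_congr_left
    intro k hk
    simp at hk
    rw [if_pos (by omega)]
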